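-- pv_equiv track=rewrite | github.com/JaredTweed/NormalForms-CanonicalCover | CanonicalCover.py | clean_fds
-- ===== SOURCE A (Python) =====
-- from collections import defaultdict
--
-- def clean_fds(data):
--     d = defaultdict(list)
--
--     # Group the data based on the first element of each tuple
--     for key, value in data:
--         key = ''.join(sorted(key))
--         value = ''.join(sorted(value))
--         d[key].append(value)
--
--     # Merge the values of each group into a single string
--     result = [(key, ''.join(sorted(set(values)))) for key, values in d.items()]
--
--     # Sort the result based on the first element of each tuple
--     result = sorted(result, key=lambda x: x[0])
--
--     return result
-- ===== SOURCE B (Python) =====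
-- def clean_fds(data):
--     # Normalize every pair once, then emit one row per distinct key in sorted
--     # order, collecting that key's distinct values by a scan over the pairs.
--     norm = [(''.join(sorted(k)), ''.join(sorted(v))) for k, v in data]
--     keys = sorted({k for k, _ in norm})
--     return [(k, ''.join(sorted({v for kk, v in norm if kk == k}))) for k in keys]
-- ===== Notes on version B (the rewrite author's own statement) =====
-- stated objective: alternative
-- what changed: Replaces the defaultdict grouping pass plus items/final sort with a dict-free decomposition: normalize all pairs once, take the sorted distinct keys, and build each output row by a direct scan collecting that key's distinct values.
import Mathlib
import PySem

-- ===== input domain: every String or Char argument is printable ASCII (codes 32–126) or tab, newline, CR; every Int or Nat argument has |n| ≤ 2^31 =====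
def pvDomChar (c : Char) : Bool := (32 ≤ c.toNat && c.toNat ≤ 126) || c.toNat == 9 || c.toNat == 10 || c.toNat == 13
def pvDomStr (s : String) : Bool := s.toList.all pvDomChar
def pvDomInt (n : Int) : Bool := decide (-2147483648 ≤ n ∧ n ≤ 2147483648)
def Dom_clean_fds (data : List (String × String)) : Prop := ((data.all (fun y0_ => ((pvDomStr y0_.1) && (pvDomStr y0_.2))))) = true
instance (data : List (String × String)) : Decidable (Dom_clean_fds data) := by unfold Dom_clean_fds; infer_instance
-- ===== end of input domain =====

-- B replaces A's defaultdict grouping + items + final sort by a dict-free decomposition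
-- (sorted distinct keys, values gathered per key by a scan); alternative, not claimed faster.

-- ''.join(sorted(s)) on a string s: joining single characters with '' is exactly
-- String.ofList of the sorted character list (exact on all inputs).
def sortChars (s : String) : String := String.ofList (PySem.List.sorted s.toList (fun c => c) false)

-- ''.join(sorted(set(vs))) for a list of strings vs (sorted of a set with the identity key:
-- the key is injective on the distinct elements, so the order is well defined).
def joinSortedSet (vs : List String) : String :=
  PySem.Str.join "" (PySem.List.sorted (PySem.Set.ofList vs) (fun v => v) false)

-- ===== PORT A =====
def clean_fds (data : List (String × String)) : List (String × String) :=
  -- d = defaultdict(list); for key, value in data: d[norm key].append(norm value)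
  let d : PySem.Dict String (List String) :=
    data.foldl (fun d p => d.modify (sortChars p.1) [] (· ++ [sortChars p.2])) PySem.Dict.empty
  -- result = [(key, ''.join(sorted(set(values)))) for key, values in d.items()]
  let result := d.items.map (fun kv => (kv.1, joinSortedSet kv.2))
  -- return sorted(result, key=lambda x: x[0])
  PySem.List.sorted result (fun x => x.1) false

-- ===== PORT B =====
def clean_fds_alt (data : List (String × String)) : List (String × String) :=
  -- norm = [(''.join(sorted(k)), ''.join(sorted(v))) for k, v in data]
  let norm := data.map (fun p => (sortChars p.1, sortChars p.2))
  -- keys = sorted({k for k, _ in norm})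
  let keys := PySem.List.sorted (PySem.Set.ofList (norm.map (·.1))) (fun k => k) false
  -- [(k, ''.join(sorted({v for kk, v in norm if kk == k}))) for k in keys]
  keys.map (fun k => (k, joinSortedSet ((norm.filter (fun q => q.1 == k)).map (·.2))))

-- ===== PRECONDITION & SPEC =====
def Spec_clean_fds (data : List (String × String)) (out : List (String × String)) : Prop := out = clean_fds_alt data
instance (data : List (String × String)) (out : List (String × String)) : Decidable (Spec_clean_fds data out) := by unfold Spec_clean_fds; infer_instance

-- ===== CLAIM (what is proved, stated in full; the proofs are below) =====
def Claim_equal_clean_fds : Prop := ∀ (data : List (String × String)), Dom_clean_fds data → Spec_clean_fds data (clean_fds data)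

-- ===== LEMMAS AND PROOFS =====

-- Sorting a list of pairs with distinct first components by fst = mapping the sorted keys.
theorem sorted_map_fst (K : List String) (hnd : K.Nodup) (g : String → String) :
    PySem.List.sorted (K.map (fun k => (k, g k))) (fun x => x.1) false
      = (PySem.List.sorted K (fun k => k) false).map (fun k => (k, g k)) := by
  apply PySem.List.sorted_eq_of_perm_of_pairwise_lt
  · exact (PySem.List.sorted_perm K (fun k => k) false).map _
  · rw [List.pairwise_map]
    have hle := PySem.List.sorted_pairwise K (fun k => k)
    have hne : (PySem.List.sorted K (fun k => k) false).Nodup :=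
      ((PySem.List.sorted_perm K (fun k => k) false).nodup_iff).2 hnd
    exact (hle.and hne).imp (fun h => lt_of_le_of_ne h.1 h.2)

theorem clean_fds_eq (data : List (String × String)) : clean_fds data = clean_fds_alt data := by
  unfold clean_fds clean_fds_alt
  dsimp only
  have hfold : data.foldl (fun d p => d.modify (sortChars p.1) [] (· ++ [sortChars p.2]))
        (PySem.Dict.empty : PySem.Dict String (List String))
      = (data.map (fun p => (sortChars p.1, sortChars p.2))).foldl
          (fun d q => d.modify q.1 [] (· ++ [q.2])) PySem.Dict.empty := by
    rw [List.foldl_map]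
  rw [hfold]
  set N := data.map (fun p => (sortChars p.1, sortChars p.2)) with hN
  set d := N.foldl (fun d q => d.modify q.1 [] (· ++ [q.2])) (PySem.Dict.empty) with hd
  have hkeys : d.keys = PySem.Set.ofList (N.map (·.1)) := by
    rw [hd, PySem.Dict.keys_foldl_modify_key]
    simp [PySem.Set.update, PySem.Set.ofList_eq_foldl]
  have hnd : d.keys.Nodup := by
    rw [hkeys]; exact PySem.Set.nodup_ofList _
  have hget : ∀ k, d.getD k [] = (N.filter (fun q => q.1 == k)).map (·.2) := by
    intro k
    rw [hd, PySem.Dict.getD_foldl_modify_append]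
    simp
  rw [PySem.Dict.items_eq_map_keys d hnd []]
  rw [List.map_map]
  simp only [Function.comp_def, hget, hkeys]
  exact sorted_map_fst _ (PySem.Set.nodup_ofList _) _

-- ===== VERDICT (by name: the statement is the Claim_ definition above) =====
theorem clean_fds_spec : Claim_equal_clean_fds := by
  intro data _
  exact clean_fds_eq data
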